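-- pv_equiv track=rewrite | github.com/nastyh/LeetCode | Basic Data Structures/260_Single_Number_III.py | singleNumber_efficient
-- ===== SOURCE A (Python) =====
-- def singleNumber_efficient(nums):
--     # difference between two numbers (x and y) which were seen only once
--     bitmask = 0
--     for num in nums:
--         bitmask ^= num
--
--     # rightmost 1-bit diff between x and y
--     diff = bitmask & (-bitmask)
--
--     x = 0
--     for num in nums:
--         # bitmask which will contain only x
--         if num & diff:
--             x ^= num
--
--     return [x, bitmask^x]
-- ===== SOURCE B (Python) =====
-- def singleNumber_efficient(nums):
--     # One pass: running xor of everything plus a per-bit-position xor table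
--     # (bit 0..32 covers every possible lowest-set-bit position of the xor of
--     # 32-bit-range inputs, including the sign-extension bit 32).
--     total = 0
--     acc = [0] * 33
--     for n in nums:
--         total ^= n
--         acc = [a ^ n if (n >> k) & 1 else a for k, a in enumerate(acc)]
--     if total == 0:
--         return [0, 0]
--     k = (total & -total).bit_length() - 1
--     x = acc[k]
--     return [x, total ^ x]
-- ===== Notes on version B (the rewrite author's own statement) =====
-- stated objective: alternative
-- what changed: A makes one xor pass to get the combined mask and then a second conditional-xor pass over the data keyed to the mask's lowest set bit; B makes a single data pass that maintains the running xor together with a 33-entry per-bit-position xor table, then reads the answer off the table at the lowest-set-bit index.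
import Mathlib
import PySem

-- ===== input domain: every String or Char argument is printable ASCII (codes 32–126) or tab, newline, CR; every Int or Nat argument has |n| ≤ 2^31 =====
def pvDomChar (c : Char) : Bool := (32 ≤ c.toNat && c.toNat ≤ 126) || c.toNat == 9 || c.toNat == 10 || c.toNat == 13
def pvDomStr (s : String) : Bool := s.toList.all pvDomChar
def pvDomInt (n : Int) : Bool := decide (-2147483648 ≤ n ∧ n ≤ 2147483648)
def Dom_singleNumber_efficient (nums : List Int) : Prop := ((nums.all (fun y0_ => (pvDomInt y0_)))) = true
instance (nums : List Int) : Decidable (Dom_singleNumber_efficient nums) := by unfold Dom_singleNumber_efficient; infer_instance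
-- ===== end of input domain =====

-- B replaces A's two xor-partition passes with one data pass that also maintains a
-- per-bit-position xor table, reading the answer off the table (alternative structure,
-- not claimed faster).

-- ===== PORT A =====
def singleNumber_efficient (nums : List Int) : List Int :=
  let bitmask := nums.foldl (fun b num => PySem.Int.bxor b num) 0
  let diff := PySem.Int.band bitmask (-bitmask)
  let x := nums.foldl (fun (x num : Int) => if PySem.Int.band num diff ≠ 0 then PySem.Int.bxor x num else x) 0
  [x, PySem.Int.bxor bitmask x]

-- ===== PORT B =====
-- acc = [a ^ n if (n >> k) & 1 else a for k, a in enumerate(acc)]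
-- (the enumerate index k is 0,1,2,…, so `.toNat` on it is exact)
def pvAccStep (n : Int) (acc : List Int) : List Int :=
  (PySem.List.enumerate acc 0).map
    (fun ka => if PySem.Int.band (n >>> ka.1.toNat) 1 ≠ 0 then PySem.Int.bxor ka.2 n else ka.2)

def singleNumber_efficient_alt (nums : List Int) : List Int :=
  let st := nums.foldl
    (fun (st : Int × List Int) n => (PySem.Int.bxor st.1 n, pvAccStep n st.2))
    (0, List.replicate 33 0)
  if st.1 = 0 then [0, 0]
  else
    let k : Int := (PySem.Int.bitLength (PySem.Int.band st.1 (-st.1)) : Int) - 1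
    -- acc[k]: the index is in range (k ≤ 32) for every input in Dom_singleNumber_efficient
    let x := PySem.List.pyGetD st.2 k 0
    [x, PySem.Int.bxor st.1 x]

-- ===== PRECONDITION & SPEC =====
def Spec_singleNumber_efficient (nums : List Int) (out : List Int) : Prop := out = singleNumber_efficient_alt nums
instance (nums : List Int) (out : List Int) : Decidable (Spec_singleNumber_efficient nums out) := by unfold Spec_singleNumber_efficient; infer_instance

-- ===== CLAIM (what is proved, stated in full; the proofs are below) =====
def Claim_equal_singleNumber_efficient : Prop := ∀ (nums : List Int), Dom_singleNumber_efficient nums → Spec_singleNumber_efficient nums (singleNumber_efficient nums)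

-- ===== LEMMAS AND PROOFS =====

-- m - (m &&& (m-1)) isolates the lowest set bit: it is a power of two not exceeding m
theorem pv_nat_low : ∀ m : Nat, 0 < m → ∃ k : Nat, m - (m &&& (m-1)) = 2^k ∧ 2^k ≤ m := by
  intro m
  induction m using Nat.strong_induction_on with
  | _ m ih =>
    intro hm
    rcases Nat.even_or_odd m with he | ho
    · obtain ⟨a, ha⟩ := he
      have ha0 : 0 < a := by omega
      obtain ⟨k, hk, hkle⟩ := ih a (by omega) ha0
      have hbit : m &&& (m - 1) = 2 * (a &&& (a - 1)) := by
        have hb1 : m = Nat.bit false a := by simp [Nat.bit]; omega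
        have hb2 : m - 1 = Nat.bit true (a - 1) := by simp [Nat.bit]; omega
        rw [hb2, hb1, Nat.land_bit]
        simp [Nat.bit]
      refine ⟨k + 1, ?_, by omega⟩
      have hle : a &&& (a - 1) ≤ a := Nat.and_le_left
      rw [hbit]
      omega
    · obtain ⟨a, ha⟩ := ho
      have hbit : m &&& (m - 1) = m - 1 := by
        have hb1 : m = Nat.bit true a := by simp [Nat.bit]; omega
        have hb2 : m - 1 = Nat.bit false a := by simp [Nat.bit]; omega
        rw [hb2, hb1, Nat.land_bit]
        simp [Nat.bit]
      exact ⟨0, by omega, by omega⟩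

-- Python's t & -t equals the Nat computation m - (m &&& (m-1)) on m = |t|
theorem pv_band_neg (t : Int) (ht : t ≠ 0) :
    PySem.Int.band t (-t) = ((t.natAbs - (t.natAbs &&& (t.natAbs - 1)) : Nat) : Int) := by
  rw [PySem.Int.band.eq_1]
  rcases lt_or_gt_of_ne ht with h | h
  · rw [if_neg (by omega), if_pos (by omega)]
    have h1 : (-t).toNat = t.natAbs := by omega
    have h2 : (-t - 1).toNat = t.natAbs - 1 := by omega
    rw [h1, h2]
  · rw [if_pos (by omega), if_neg (by omega)]
    have h1 : t.toNat = t.natAbs := by omega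
    have h2 : (- -t - 1).toNat = t.natAbs - 1 := by omega
    rw [h1, h2]

theorem pv_bitLength_pow (k : Nat) : PySem.Int.bitLength ((2^k : Nat) : Int) = k + 1 := by
  induction k with
  | zero => decide
  | succ k ih =>
      rw [PySem.Int.bitLength_natCast (by positivity)]
      have h : 2^(k+1)/2 = 2^k := by omega
      rw [h, ih]

theorem pv_neg_ediv (a b : Nat) (hb : 0 < b) :
    (-(a:Int) - 1) / (b:Int) = -((a / b : Nat) : Int) - 1 := by
  have h1 := Nat.div_add_mod a b
  have h2 : a % b < b := Nat.mod_lt _ hb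
  have h3 : ((b:Int) * ((a / b : Nat) : Int) + ((a % b : Nat) : Int)) = (a : Int) := by exact_mod_cast h1
  refine ((Int.ediv_emod_unique (a := -(a:Int)-1) (b := (b:Int))
      (q := -((a/b : Nat):Int) - 1) (r := (b:Int) - 1 - ((a % b : Nat):Int)) (by exact_mod_cast hb)).mpr ?_).1
  refine ⟨by linear_combination -h3, by omega, by omega⟩

theorem pv_cast_div (a b : Nat) : ((a : Int)) / ((b : Int)) = ((a / b : Nat) : Int) := by
  rcases Nat.eq_zero_or_pos b with hb | hb
  · simp [hb]
  · have h1 := Nat.div_add_mod a b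
    have h2 : a % b < b := Nat.mod_lt _ hb
    have h3 : ((b:Int) * ((a / b : Nat) : Int) + ((a % b : Nat) : Int)) = (a : Int) := by exact_mod_cast h1
    refine ((Int.ediv_emod_unique (a := (a:Int)) (b := (b:Int))
        (q := ((a/b : Nat):Int)) (r := ((a % b : Nat):Int)) (by exact_mod_cast hb)).mpr ?_).1
    refine ⟨by linear_combination h3, by omega, by omega⟩

-- (n & 2^k) != 0  ↔  ((n >> k) & 1) != 0
theorem pv_bridge (n : Int) (k : Nat) :
    (PySem.Int.band n ((2^k : Nat) : Int) ≠ 0) ↔ (PySem.Int.band (n >>> k) 1 ≠ 0) := by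
  have hp : (0:Nat) < 2^k := Nat.two_pow_pos k
  rw [PySem.Int.band_one, PySem.Int.mod_eq_emod_of_pos (by norm_num)]
  have hs : n >>> k = n / ((2^k : Nat) : Int) := Int.shiftRight_eq_div_pow n k
  rcases le_or_gt 0 n with hn | hn
  · rw [hs, PySem.Int.band_of_nonneg hn (by positivity)]
    rw [Int.toNat_natCast, Nat.and_two_pow]
    have hdiv : n / ((2^k : Nat) : Int) = ((n.toNat / 2^k : Nat) : Int) := by
      conv_lhs => rw [show n = ((n.toNat : Nat) : Int) by omega]
      exact pv_cast_div n.toNat (2^k)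
    rw [hdiv, Nat.testBit_eq_decide_div_mod_eq]
    by_cases hq : n.toNat / 2^k % 2 = 1 <;> simp only [hq, decide_true, decide_false] <;>
      (simp only [Bool.toNat_true, Bool.toNat_false]; omega)
  · rw [PySem.Int.band.eq_1, if_neg (by omega), if_pos (by positivity)]
    set m := (-n - 1).toNat with hmdef
    have hm : n = -(m:Int) - 1 := by omega
    rw [Int.toNat_natCast, Nat.two_pow_and]
    rw [hs, hm, pv_neg_ediv m (2^k) hp]
    rw [Nat.testBit_eq_decide_div_mod_eq]
    by_cases hq : m / 2^k % 2 = 1 <;> simp only [hq, decide_true, decide_false] <;>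
      (simp only [Bool.toNat_true, Bool.toNat_false]; omega)

theorem pv_bxor_bound (a b : Int) (ha1 : -(2^32) ≤ a) (ha2 : a < 2^32)
    (hb1 : -(2^32) ≤ b) (hb2 : b < 2^32) :
    -(2^32) ≤ PySem.Int.bxor a b ∧ PySem.Int.bxor a b < 2^32 := by
  rw [PySem.Int.bxor.eq_1]
  split_ifs with h1 h2 h2 <;>
  · have hx : _ < 2^32 := Nat.xor_lt_two_pow (n := 32)
      (x := (if 0 ≤ a then a.toNat else (-a-1).toNat)) (by split <;> omega)
      (y := (if 0 ≤ b then b.toNat else (-b-1).toNat)) (by split <;> omega)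
    simp only [h1, h2, if_true, if_false] at hx ⊢
    omega

theorem pv_fold_bound (nums : List Int) (hd : ∀ n ∈ nums, -(2^32) ≤ n ∧ n < 2^32) :
    ∀ a : Int, -(2^32) ≤ a → a < 2^32 →
      -(2^32) ≤ nums.foldl (fun b num => PySem.Int.bxor b num) a ∧
      nums.foldl (fun b num => PySem.Int.bxor b num) a < 2^32 := by
  induction nums with
  | nil => intro a h1 h2; exact ⟨h1, h2⟩
  | cons n ns ih =>
      intro a h1 h2
      have hn := hd n (List.mem_cons_self ..)
      have hb := pv_bxor_bound a n h1 h2 hn.1 hn.2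
      exact ih (fun m hm => hd m (List.mem_cons_of_mem _ hm)) _ hb.1 hb.2

theorem pv_fst_fold (nums : List Int) : ∀ (a : Int) (l : List Int),
    (nums.foldl (fun (st : Int × List Int) n => (PySem.Int.bxor st.1 n, pvAccStep n st.2)) (a, l)).1
      = nums.foldl (fun b num => PySem.Int.bxor b num) a := by
  induction nums with
  | nil => intro a l; rfl
  | cons n ns ih => intro a l; simpa using ih (PySem.Int.bxor a n) (pvAccStep n l)

theorem pv_accStep_map (n : Int) (f : Nat → Int) :
    pvAccStep n ((List.range 33).map f)
      = (List.range 33).map (fun (k : Nat) => if PySem.Int.band (n >>> k) 1 ≠ 0 then PySem.Int.bxor (f k) n else f k) := by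
  apply List.ext_getElem
  · simp [pvAccStep, PySem.List.length_enumerate]
  · intro i h1 h2
    simp only [pvAccStep, List.getElem_map, PySem.List.getElem_enumerate, List.getElem_range]
    have h3 : ((0:Int) + (i:Int)).toNat = i := by omega
    rw [h3]
    rw [Int.shiftRight_natCast_right]

theorem pv_snd_fold (nums : List Int) : ∀ (a : Int) (f : Nat → Int),
    (nums.foldl (fun (st : Int × List Int) n => (PySem.Int.bxor st.1 n, pvAccStep n st.2)) (a, (List.range 33).map f)).2
      = (List.range 33).map (fun (k : Nat) => nums.foldl (fun (x num : Int) => if PySem.Int.band (num >>> k) 1 ≠ 0 then PySem.Int.bxor x num else x) (f k)) := by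
  induction nums with
  | nil => intro a f; rfl
  | cons n ns ih =>
      intro a f
      simp only [List.foldl_cons]
      rw [pv_accStep_map, ih (PySem.Int.bxor a n)
        (fun k => if PySem.Int.band (n >>> k) 1 ≠ 0 then PySem.Int.bxor (f k) n else f k)]

theorem pv_fold_zero_cond (nums : List Int) :
    nums.foldl (fun (x num : Int) => if PySem.Int.band num 0 ≠ 0 then PySem.Int.bxor x num else x) 0 = 0 := by
  induction nums with
  | nil => rfl
  | cons n ns ih =>
      rw [List.foldl_cons, if_neg (by simp [PySem.Int.band_zero])]
      exact ih

-- ===== VERDICT (by name: the statement is the Claim_ definition above) =====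
theorem singleNumber_efficient_spec : Claim_equal_singleNumber_efficient := by
  intro nums hdom
  have hd : ∀ n ∈ nums, -(2^32) ≤ n ∧ n < 2^32 := by
    intro n hn
    have := List.all_eq_true.mp hdom n hn
    simp only [pvDomInt, decide_eq_true_eq] at this
    omega
  unfold Spec_singleNumber_efficient singleNumber_efficient singleNumber_efficient_alt
  simp only []
  have hrep : (List.replicate 33 (0:Int)) = (List.range 33).map (fun _ => (0:Int)) := by
    simp [List.map_const']
  rw [hrep, pv_fst_fold]
  set t := nums.foldl (fun b num => PySem.Int.bxor b num) (0:Int) with htdef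
  by_cases ht : t = 0
  · rw [if_pos ht, ht]
    have h0 : PySem.Int.band (0:Int) (-0) = 0 := by decide
    rw [neg_zero] at h0 ⊢
    rw [h0, pv_fold_zero_cond]
    simp [PySem.Int.bxor]
  · rw [if_neg ht]
    obtain ⟨k, hk, hkle⟩ := pv_nat_low t.natAbs (by omega)
    have hdiff : PySem.Int.band t (-t) = ((2^k : Nat) : Int) := by
      rw [pv_band_neg t ht, hk]
    have htb : -(2^32) ≤ t ∧ t < 2^32 := pv_fold_bound nums hd 0 (by norm_num) (by norm_num)
    have hk33 : k < 33 := by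
      have h1 : t.natAbs ≤ 2^32 := by omega
      have h2 : (2:Nat)^k ≤ 2^32 := le_trans hkle h1
      have := (Nat.pow_le_pow_iff_right (a := 2) (by norm_num)).mp h2
      omega
    rw [hdiff, pv_bitLength_pow k, pv_snd_fold]
    have hidx : ((k + 1 : Nat) : Int) - 1 = ((k : Nat) : Int) := by push_cast; ring
    rw [hidx, PySem.List.pyGetD_natCast]
    have hget : ((List.range 33).map (fun (j : Nat) => nums.foldl (fun (x num : Int) => if PySem.Int.band (num >>> j) 1 ≠ 0 then PySem.Int.bxor x num else x) ((fun _ => (0:Int)) j))).getD k 0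
        = nums.foldl (fun (x num : Int) => if PySem.Int.band (num >>> k) 1 ≠ 0 then PySem.Int.bxor x num else x) 0 := by
      simp [List.getD, hk33]
    rw [hget]
    have hcong : (fun (x num : Int) => if PySem.Int.band num ((2^k : Nat) : Int) ≠ 0 then PySem.Int.bxor x num else x)
        = (fun (x num : Int) => if PySem.Int.band (num >>> k) 1 ≠ 0 then PySem.Int.bxor x num else x) := by
      funext x num
      exact if_congr (pv_bridge num k) rfl rfl
    rw [hcong]
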